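-- pv_equiv track=rewrite | github.com/michahutter/SMOTE_fingerprints | source/code/ranks.py | group_manhatten
-- ===== SOURCE A (Python) =====
-- def group_manhatten(data):
--     """ Groups all Manhatten distance entries in a distance file belonging to one active and sums the distances.
--
--     Helper function for ranking_manhatten()
--
--     Parameters
--     ----------
--     data : list of list
--         Each list contains a list with the data found in one row of a distance file. One list contains the name of an
--         active, name of an inactive and the Manhatten distance of this pair, in this order. Data is provided by
--         distances.read_distances() function.
--
--     Returns
--     -------
--     list of list
--          Every list contains a list with the actives name and the summed manhattan distance, in this order.
--     """
--
--     active = data[0][0]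
--     man = list()
--     sums = list()
--     for i in range(len(data)):
--         if data[i][0] != active:
--             sums.append([active, man])
--             active = data[i][0]
--             man = list()
--         man = man + [data[i][2]]
--
--     sums.append([active, man])
--     return sums
-- ===== SOURCE B (Python) =====
-- def group_manhatten(data):
--     # Build the grouping back-to-front: walk the rows in reverse and merge each
--     # row's distance into the front group when the key matches, else open a new
--     # front group. No current-key/flush state machine is needed.
--     groups = []
--     for row in reversed(data):
--         if groups and groups[0][0] == row[0]:
--             groups[0][1].insert(0, row[2])
--         else:
--             groups.insert(0, [row[0], [row[2]]])
--     return groups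
-- ===== Notes on version B (the rewrite author's own statement) =====
-- stated objective: alternative
-- what changed: Builds the result back-to-front by folding over the rows in reverse and merging each distance into the current front group (or opening a new one), instead of A's forward change-detection state machine with an explicit flush of the pending group.
import Mathlib
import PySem

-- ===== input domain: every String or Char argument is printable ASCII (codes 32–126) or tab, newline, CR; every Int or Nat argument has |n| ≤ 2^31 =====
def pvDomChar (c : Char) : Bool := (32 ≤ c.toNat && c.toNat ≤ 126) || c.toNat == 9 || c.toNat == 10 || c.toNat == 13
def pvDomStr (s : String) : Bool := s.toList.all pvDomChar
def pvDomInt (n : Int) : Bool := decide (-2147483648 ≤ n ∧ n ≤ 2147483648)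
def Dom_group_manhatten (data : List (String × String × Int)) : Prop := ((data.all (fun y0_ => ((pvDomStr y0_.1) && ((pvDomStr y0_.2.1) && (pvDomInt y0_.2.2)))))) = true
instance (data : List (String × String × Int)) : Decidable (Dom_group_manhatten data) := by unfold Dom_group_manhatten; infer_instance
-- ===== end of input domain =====

-- B builds the grouping back-to-front (reverse fold merging into the front group)
-- instead of A's forward change-detection/flush state machine; objective: alternative.

-- ===== PORT A =====
-- A's for-loop over range(len(data)) reading data[i] is transliterated as a foldl over
-- data with the same (active, man, sums) state; branch order preserved.
def group_manhatten (data : List (String × String × Int)) : List (String × List Int) :=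
  match data with
  | [] => []   -- unreachable: Pre_ excludes empty input, on which Python A raises IndexError
  | d0 :: _ =>
    let st := data.foldl
      (fun (st : String × List Int × List (String × List Int)) row =>
        let active := st.1; let man := st.2.1; let sums := st.2.2
        if row.1 != active then
          (row.1, [] ++ [row.2.2], sums ++ [(active, man)])
        else
          (active, man ++ [row.2.2], sums))
      (d0.1, [], [])
    st.2.2 ++ [(st.1, st.2.1)]

-- ===== PORT B =====
-- B's loop over reversed(data) with a mutable accumulator is the structural right fold:
-- merge the row's distance into the front group if the key matches, else open a new group.
def group_manhatten_alt (data : List (String × String × Int)) : List (String × List Int) :=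
  data.foldr
    (fun row groups =>
      match groups with
      | (k, ds) :: rest =>
        if k == row.1 then (k, row.2.2 :: ds) :: rest
        else (row.1, [row.2.2]) :: (k, ds) :: rest
      | [] => [(row.1, [row.2.2])])
    []

-- ===== PRECONDITION & SPEC =====
-- Pre_ excludes only the empty list, on which Python A raises IndexError at data[0][0].
def Pre_group_manhatten (data : List (String × String × Int)) : Prop := data ≠ []
instance (data : List (String × String × Int)) : Decidable (Pre_group_manhatten data) := by unfold Pre_group_manhatten; infer_instance
def pvWitness_group_manhatten : (List (String × String × Int)) := [("a", "x", 1), ("a", "y", 2), ("b", "x", 3)]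

def Spec_group_manhatten (data : List (String × String × Int)) (out : List (String × List Int)) : Prop := out = group_manhatten_alt data
instance (data : List (String × String × Int)) (out : List (String × List Int)) : Decidable (Spec_group_manhatten data out) := by unfold Spec_group_manhatten; infer_instance

-- ===== CLAIM (what is proved, stated in full; the proofs are below) =====
def Claim_equal_group_manhatten : Prop := ∀ (data : List (String × String × Int)), Dom_group_manhatten data → Pre_group_manhatten data → Spec_group_manhatten data (group_manhatten data)

-- ===== LEMMAS AND PROOFS =====

-- B's fold satisfies the consecutive-run recurrence.
theorem pvAlt_cons (r : String × String × Int) (t : List (String × String × Int)) :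
    group_manhatten_alt (r :: t) =
      (r.1, r.2.2 :: (t.takeWhile (fun x => x.1 == r.1)).map (fun x => x.2.2)) ::
        group_manhatten_alt (t.dropWhile (fun x => x.1 == r.1)) := by
  induction t generalizing r with
  | nil => simp [group_manhatten_alt]
  | cons s t' ih =>
    have h1 := ih s
    by_cases h : s.1 = r.1
    · simp only [group_manhatten_alt, List.foldr_cons] at h1 ⊢
      rw [h1]
      simp [h]
    · have hb : (s.1 == r.1) = false := by simp [h]
      have ht : ((s :: t').takeWhile (fun x => x.1 == r.1)) = [] := by
        simp [hb]
      have hd : ((s :: t').dropWhile (fun x => x.1 == r.1)) = s :: t' := by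
        simp [hb]
      rw [ht, hd]
      simp only [group_manhatten_alt, List.foldr_cons] at h1 ⊢
      rw [h1]
      simp [hb]

-- `pvRun a m l`: A's remaining output when the loop state is (active = a, man = m) and
-- the rows l remain, with the pending flushes already emitted.
def pvRun (a : String) (m : List Int) : List (String × String × Int) → List (String × List Int)
  | [] => [(a, m)]
  | r :: t => if r.1 != a then (a, m) :: pvRun r.1 ([] ++ [r.2.2]) t else pvRun a (m ++ [r.2.2]) t

theorem pvFoldl_run (l : List (String × String × Int)) :
    ∀ (a : String) (m : List Int) (s : List (String × List Int)),
    (let st := l.foldl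
      (fun (st : String × List Int × List (String × List Int)) row =>
        let active := st.1; let man := st.2.1; let sums := st.2.2
        if row.1 != active then
          (row.1, [] ++ [row.2.2], sums ++ [(active, man)])
        else
          (active, man ++ [row.2.2], sums))
      (a, m, s)
     st.2.2 ++ [(st.1, st.2.1)]) = s ++ pvRun a m l := by
  induction l with
  | nil => intro a m s; simp [pvRun]
  | cons r t ih =>
    intro a m s
    simp only [List.foldl_cons, pvRun]
    by_cases h : r.1 != a
    · simp only [h, if_true, ih]; simp
    · simp only [h, ih]; simp at h; simp

theorem pvRun_alt (l : List (String × String × Int)) :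
    ∀ (a : String) (m : List Int),
    pvRun a m l =
      (a, m ++ (l.takeWhile (fun x => x.1 == a)).map (fun x => x.2.2)) ::
        group_manhatten_alt (l.dropWhile (fun x => x.1 == a)) := by
  induction l with
  | nil => intro a m; simp [pvRun, group_manhatten_alt]
  | cons r t ih =>
    intro a m
    by_cases h : r.1 = a
    · simp only [pvRun, h, bne_self_eq_false, ih,
        List.takeWhile_cons, List.dropWhile_cons, beq_self_eq_true, if_true]
      simp
    · have hb : (r.1 != a) = true := by simp [h]
      have hb' : (r.1 == a) = false := by simp [h]
      simp only [pvRun, hb, if_true, List.takeWhile_cons, List.dropWhile_cons, hb',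
        Bool.false_eq_true, if_false, List.map_nil, List.append_nil]
      rw [ih, pvAlt_cons]
      simp

-- ===== VERDICT (by name: the statement is the Claim_ definition above) =====
theorem group_manhatten_spec : Claim_equal_group_manhatten := by
  intro data _ hpre
  unfold Spec_group_manhatten
  match data, hpre with
  | d0 :: t, _ =>
    show (let st := (d0 :: t).foldl _ (d0.1, [], []); st.2.2 ++ [(st.1, st.2.1)]) = _
    rw [pvFoldl_run (d0 :: t) d0.1 [] [], pvRun_alt, pvAlt_cons]
    simp
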